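-- pv_equiv track=rewrite | github.com/ChelomoLubliner/thesis_shoes | contour.py | dict_points_x
-- ===== SOURCE A (Python) =====
-- def dict_points_x(all_points):
--     points = all_points
--     # create an empty dictionary to store the x and y values
--     points_dict = {}
--     # iterate over the list of points and add the x and y values to the dictionary
--     for x_i, y_i in points:
--         if x_i not in points_dict:
--             points_dict[x_i] = [y_i]
--         else:
--             points_dict[x_i].append(y_i)
--     return points_dict
-- ===== SOURCE B (Python) =====
-- def dict_points_x(all_points):
--     # Two-pass grouping: dedup the x's in first-appearance order, then gather
--     # each group's y-values with a filtering pass per distinct x.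
--     xs = list(dict.fromkeys(x for x, _ in all_points))
--     return {x: [y for a, y in all_points if a == x] for x in xs}
-- ===== Notes on version B (the rewrite author's own statement) =====
-- stated objective: alternative
-- what changed: Replaces the one-pass mutable-dict accumulation with a two-pass strategy: first dedup the x-coordinates in order of first appearance, then build the result dict by a filtering comprehension per distinct x.
import Mathlib
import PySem

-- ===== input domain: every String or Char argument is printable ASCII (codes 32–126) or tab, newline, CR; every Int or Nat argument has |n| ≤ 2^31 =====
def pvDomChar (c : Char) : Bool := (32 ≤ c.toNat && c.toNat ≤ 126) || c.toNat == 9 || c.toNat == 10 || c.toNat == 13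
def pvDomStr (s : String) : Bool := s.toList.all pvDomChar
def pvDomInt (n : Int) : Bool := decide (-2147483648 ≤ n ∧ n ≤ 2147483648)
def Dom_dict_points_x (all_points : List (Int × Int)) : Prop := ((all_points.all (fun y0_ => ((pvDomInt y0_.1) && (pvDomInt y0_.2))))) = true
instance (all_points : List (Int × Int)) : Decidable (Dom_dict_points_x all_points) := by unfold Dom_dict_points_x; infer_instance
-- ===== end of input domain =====

-- B replaces A's one-pass mutable-dict grouping with a two-pass dedup-then-filter
-- decomposition (objective: alternative; cost is O(n·k) vs A's O(n)).

-- ===== PORT A =====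
-- A: one pass; a dict accumulates a list per x-key (insert on fresh key, append else).
def dict_points_x (all_points : List (Int × Int)) : List (Int × List Int) :=
  (all_points.foldl
    (fun d p =>
      if d.contains p.1 = false then d.insert p.1 [p.2]
      else d.modify p.1 [] (fun ys => ys ++ [p.2]))
    PySem.Dict.empty).items

-- ===== PORT B =====
-- B: dedup the x's in first-appearance order, then one filtering pass per distinct x.
def dict_points_x_alt (all_points : List (Int × Int)) : List (Int × List Int) :=
  (PySem.List.dedup (all_points.map (·.1))).map
    (fun x => (x, (all_points.filter (fun p => p.1 == x)).map (·.2)))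

-- ===== PRECONDITION & SPEC =====
def Spec_dict_points_x (all_points : List (Int × Int)) (out : List (Int × List Int)) : Prop := out = dict_points_x_alt all_points
instance (all_points : List (Int × Int)) (out : List (Int × List Int)) : Decidable (Spec_dict_points_x all_points out) := by unfold Spec_dict_points_x; infer_instance

-- ===== CLAIM (what is proved, stated in full; the proofs are below) =====
def Claim_equal_dict_points_x : Prop := ∀ (all_points : List (Int × Int)), Dom_dict_points_x all_points → Spec_dict_points_x all_points (dict_points_x all_points)

-- ===== LEMMAS AND PROOFS =====

-- A's step function coincides with an unconditional dict-modify (on a fresh key,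
-- modify with default [] inserts [y] exactly as A's then-branch does).
theorem dict_points_x_step_eq (d : PySem.Dict Int (List Int)) (p : Int × Int) :
    (if d.contains p.1 = false then d.insert p.1 [p.2]
     else d.modify p.1 [] (fun ys => ys ++ [p.2]))
      = d.modify p.1 [] (fun ys => ys ++ [p.2]) := by
  by_cases h : d.contains p.1 = false
  · have h0 : d.getD p.1 [] = [] := PySem.Dict.getD_of_not_contains d (d0 := []) h
    simp only [h, if_true, PySem.Dict.modify, h0]
    rfl
  · simp [h]

theorem dict_points_x_eq_alt (all_points : List (Int × Int)) :
    dict_points_x all_points = dict_points_x_alt all_points := by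
  unfold dict_points_x dict_points_x_alt
  have hstep : ∀ (l : List (Int × Int)) (d : PySem.Dict Int (List Int)),
      l.foldl (fun d p =>
        if d.contains p.1 = false then d.insert p.1 [p.2]
        else d.modify p.1 [] (fun ys => ys ++ [p.2])) d
      = l.foldl (fun d p => d.modify p.1 [] (fun ys => ys ++ [p.2])) d := by
    intro l d
    simp only [dict_points_x_step_eq]
  rw [hstep]
  set D := all_points.foldl (fun d p => d.modify p.1 [] (fun ys => ys ++ [p.2]))
    PySem.Dict.empty with hD
  have hnd : D.keys.Nodup := by
    rw [hD]
    exact PySem.Dict.nodup_keys_foldl_modify_key all_points (·.1) []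
      (fun d p ys => ys ++ [p.2]) PySem.Dict.empty PySem.Dict.nodup_keys_empty
  have hkeys : D.keys = PySem.List.dedup (all_points.map (·.1)) := by
    rw [hD]
    rw [PySem.Dict.keys_foldl_modify_key]
    simp [PySem.Dict.keys_empty, PySem.Set.update_nil_left]
  have hitems := PySem.Dict.items_eq_map_keys D hnd []
  rw [hitems, hkeys]
  refine List.map_congr_left (fun x hx => ?_)
  have hget : D.getD x [] =
      (all_points.filter (fun p => p.1 == x)).map (·.2) := by
    rw [hD]
    have := PySem.Dict.getD_foldl_modify_append (l := all_points)
      (d := (PySem.Dict.empty : PySem.Dict Int (List Int))) (c := x)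
    simpa [PySem.Dict.getD_empty] using this
  rw [hget]

-- ===== VERDICT (by name: the statement is the Claim_ definition above) =====
theorem dict_points_x_spec : Claim_equal_dict_points_x := by
  intro all_points _
  exact dict_points_x_eq_alt all_points
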